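-- pv_equiv track=rewrite | github.com/VishwamAI/alpha-math | alphamath/discrete_mathematics/set_theory.py | is_partition
-- ===== SOURCE A (Python) =====
-- from typing import Set, FrozenSet, List, Tuple
--
-- def union(*sets: Set) -> Set:
--     """
--     Calculate the union of multiple sets.
--
--     :param sets: Variable number of sets
--     :return: Union of all input sets
--     """
--     return set().union(*sets)
--
-- def intersection(*sets: Set) -> Set:
--     """
--     Calculate the intersection of multiple sets.
--
--     :param sets: Variable number of sets
--     :return: Intersection of all input sets
--     """
--     return set.intersection(*sets)
--
-- def is_partition(subsets: List[Set], universal_set: Set) -> bool: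
--     """
--     Check if a list of subsets forms a partition of the universal set.
--
--     :param subsets: List of subsets
--     :param universal_set: Universal set
--     :return: True if subsets form a partition, False otherwise
--     """
--     if not all(subset.issubset(universal_set) for subset in subsets):
--         return False
--
--     if union(*subsets) != universal_set:
--         return False
--
--     for i, subset1 in enumerate(subsets):
--         for subset2 in subsets[i+1:]:
--             if intersection(subset1, subset2):
--                 return False
--
--     return True
-- ===== SOURCE B (Python) =====
-- def is_partition(subsets, universal_set):
--     # One pass over all elements: each must be in the universal set and unseen
--     # (disjointness + subset check at once); then coverage via cardinality.
--     seen = set()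
--     for subset in subsets:
--         for x in subset:
--             if x not in universal_set or x in seen:
--                 return False
--             seen.add(x)
--     return len(seen) == len(universal_set)
-- ===== Notes on version B (the rewrite author's own statement) =====
-- stated objective: alternative
-- what changed: Replaced A's three separate passes (per-subset issubset scans, building the full union and comparing it to the universal set, and an O(k^2) pairwise-intersection loop) with one single pass over all elements maintaining a 'seen' set (an element already seen or outside the universal set fails immediately) followed by a cardinality comparison for coverage.
import Mathlib
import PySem

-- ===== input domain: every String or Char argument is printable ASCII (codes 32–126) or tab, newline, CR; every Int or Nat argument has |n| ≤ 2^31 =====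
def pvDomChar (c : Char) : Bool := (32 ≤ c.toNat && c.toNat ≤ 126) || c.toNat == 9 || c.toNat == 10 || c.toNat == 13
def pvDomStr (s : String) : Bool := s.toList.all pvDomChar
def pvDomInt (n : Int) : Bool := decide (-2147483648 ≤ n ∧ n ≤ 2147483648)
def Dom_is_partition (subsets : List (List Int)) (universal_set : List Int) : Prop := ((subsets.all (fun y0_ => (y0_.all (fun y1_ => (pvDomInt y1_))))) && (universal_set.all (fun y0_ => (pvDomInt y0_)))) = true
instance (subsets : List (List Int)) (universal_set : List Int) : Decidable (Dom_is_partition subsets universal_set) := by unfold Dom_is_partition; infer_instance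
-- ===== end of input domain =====

-- B: one pass over all elements with a 'seen' set, then a cardinality check, instead of A's three separate passes.

-- ===== PORT A =====
-- union(*subsets): set().union(*sets), folded left over the subsets
def pyUnionAll (subsets : List (List Int)) : PySem.Set Int :=
  subsets.foldl (fun acc s => PySem.Set.union acc s) PySem.Set.empty

-- the nested 'for i, subset1 in enumerate(subsets): for subset2 in subsets[i+1:]' loop,
-- returning False as soon as intersection(subset1, subset2) is truthy (non-empty)
def pyPairsLoop : List (List Int) → Bool
  | [] => true
  | s1 :: rest =>
      if rest.any (fun s2 => !(PySem.Set.inter s1 s2).isEmpty) then false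
      else pyPairsLoop rest

def is_partition (subsets : List (List Int)) (universal_set : List Int) : Bool :=
  if !(subsets.all (fun subset => PySem.Set.issubset subset universal_set)) then false
  else if !(PySem.Set.equal (pyUnionAll subsets) universal_set) then false
  else pyPairsLoop subsets

-- ===== PORT B =====
-- inner 'for x in subset' loop of Source B
def altInner (universal_set : List Int) : List Int → PySem.Set Int → Option (PySem.Set Int)
  | [], seen => some seen
  | x :: xs, seen =>
      if !(PySem.Set.contains universal_set x) || PySem.Set.contains seen x then none
      else altInner universal_set xs (PySem.Set.add seen x)

-- outer 'for subset in subsets' loop of Source B (none = early 'return False')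
def altOuter (universal_set : List Int) : List (List Int) → PySem.Set Int → Option (PySem.Set Int)
  | [], seen => some seen
  | s :: rest, seen =>
      match altInner universal_set s seen with
      | none => none
      | some seen' => altOuter universal_set rest seen'

def is_partition_alt (subsets : List (List Int)) (universal_set : List Int) : Bool :=
  match altOuter universal_set subsets PySem.Set.empty with
  | none => false
  | some seen => PySem.Set.len seen == (universal_set.length : Int)

-- ===== PRECONDITION & SPEC =====
-- The Python arguments are sets; their List encodings hold distinct elements, so Pre_
-- excludes only lists with duplicates, which encode no Python input of A at all.
def Pre_is_partition (subsets : List (List Int)) (universal_set : List Int) : Prop :=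
  universal_set.Nodup ∧ ∀ s ∈ subsets, s.Nodup
instance (subsets : List (List Int)) (universal_set : List Int) : Decidable (Pre_is_partition subsets universal_set) := by unfold Pre_is_partition; infer_instance

def pvWitness_is_partition : List (List Int) × List Int := ([[1, 2], [3]], [1, 2, 3])

def Spec_is_partition (subsets : List (List Int)) (universal_set : List Int) (out : Bool) : Prop := out = is_partition_alt subsets universal_set
instance (subsets : List (List Int)) (universal_set : List Int) (out : Bool) : Decidable (Spec_is_partition subsets universal_set out) := by unfold Spec_is_partition; infer_instance

-- ===== CLAIM (what is proved, stated in full; the proofs are below) =====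
def Claim_equal_is_partition : Prop := ∀ (subsets : List (List Int)) (universal_set : List Int), Dom_is_partition subsets universal_set → Pre_is_partition subsets universal_set → Spec_is_partition subsets universal_set (is_partition subsets universal_set)

-- ===== LEMMAS AND PROOFS =====

-- characterisation of B's inner loop
theorem altInner_char (U : List Int) (s : List Int) (seen : PySem.Set Int)
    (h : seen.Nodup) :
    altInner U s seen =
      if (∀ x ∈ s, x ∈ U) ∧ (seen ++ s).Nodup then some (seen ++ s) else none := by
  induction s generalizing seen with
  | nil => simp [altInner, h]
  | cons x xs ih =>
    simp only [altInner]
    by_cases hxU : x ∈ U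
    · by_cases hxs : x ∈ seen
      · have : (!PySem.Set.contains U x || PySem.Set.contains seen x) = true := by
          simp [PySem.Set.contains, hxs]
        rw [if_pos this]
        rw [if_neg]
        rintro ⟨-, hnd⟩
        rw [List.nodup_append] at hnd
        exact hnd.2.2 x hxs x (by simp) rfl
      · have hc : (!PySem.Set.contains U x || PySem.Set.contains seen x) = false := by
          simp [PySem.Set.contains, hxs, hxU]
        rw [if_neg (by simp [PySem.Set.contains, hxU]; exact hxs)]
        have hadd : PySem.Set.add seen x = seen ++ [x] := by
          simp only [PySem.Set.add, PySem.Set.contains]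
          rw [if_neg]
          simp only [List.contains_eq_mem, decide_eq_true_eq]
          exact hxs
        rw [hadd] at *
        have hnd : (seen ++ [x]).Nodup :=
          h.append (List.nodup_singleton x) (fun a ha hb => hxs ((List.mem_singleton.1 hb) ▸ ha))
        rw [ih _ hnd]
        have heq : seen ++ [x] ++ xs = seen ++ x :: xs := by simp
        rw [heq]
        congr 1
        simp only [eq_iff_iff]
        constructor
        · rintro ⟨h1, h2⟩
          refine ⟨fun y hy => ?_, h2⟩
          rcases List.mem_cons.1 hy with rfl | hy
          · exact hxU
          · exact h1 y hy
        · rintro ⟨h1, h2⟩; exact ⟨fun y hy => h1 y (by simp [hy]), h2⟩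
    · have : (!PySem.Set.contains U x || PySem.Set.contains seen x) = true := by
        simp [PySem.Set.contains, hxU]
      rw [if_pos this, if_neg]
      rintro ⟨h1, -⟩
      exact hxU (h1 x (by simp))

-- characterisation of B's outer loop
theorem altOuter_char (U : List Int) (L : List (List Int)) (seen : PySem.Set Int)
    (h : seen.Nodup) :
    altOuter U L seen =
      if (∀ x ∈ L.flatten, x ∈ U) ∧ (seen ++ L.flatten).Nodup then some (seen ++ L.flatten) else none := by
  induction L generalizing seen with
  | nil => simp [altOuter, h]
  | cons s rest ih =>
    have hin := altInner_char U s seen h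
    by_cases h1 : (∀ x ∈ s, x ∈ U) ∧ (seen ++ s).Nodup
    · rw [if_pos h1] at hin
      simp only [altOuter, hin]
      rw [ih _ h1.2]
      have heq : seen ++ s ++ rest.flatten = seen ++ (s :: rest).flatten := by simp
      rw [heq]
      congr 1
      simp only [eq_iff_iff]
      constructor
      · rintro ⟨h2, h3⟩
        refine ⟨fun y hy => ?_, by simpa using h3⟩
        simp only [List.flatten_cons, List.mem_append] at hy
        rcases hy with hy | hy
        · exact h1.1 y hy
        · exact h2 y hy
      · rintro ⟨h2, h3⟩
        exact ⟨fun y hy => h2 y (by simp [hy]), by simpa using h3⟩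
    · rw [if_neg h1] at hin
      simp only [altOuter, hin]
      rw [if_neg]
      rintro ⟨h2, h3⟩
      apply h1
      constructor
      · intro y hy; exact h2 y (by simp [hy])
      · have : seen ++ (s :: rest).flatten = (seen ++ s) ++ rest.flatten := by simp
        rw [this] at h3
        exact h3.sublist (List.sublist_append_left _ _)

theorem alt_true_iff (subsets : List (List Int)) (U : List Int) :
    is_partition_alt subsets U = true ↔
      (∀ x ∈ subsets.flatten, x ∈ U) ∧ subsets.flatten.Nodup ∧
        subsets.flatten.length = U.length := by
  have hout := altOuter_char U subsets PySem.Set.empty (by simp [PySem.Set.empty])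
  by_cases h : (∀ x ∈ subsets.flatten, x ∈ U) ∧ (PySem.Set.empty ++ subsets.flatten).Nodup
  · rw [if_pos h] at hout
    unfold is_partition_alt
    simp only [hout]
    simp only [PySem.Set.empty, List.nil_append] at h ⊢
    simp only [PySem.Set.len, beq_iff_eq, Nat.cast_inj]
    tauto
  · rw [if_neg h] at hout
    unfold is_partition_alt
    simp only [hout]
    simp only [PySem.Set.empty, List.nil_append] at h
    simp only [Bool.false_eq_true, false_iff]
    intro hc
    exact h ⟨hc.1, hc.2.1⟩

theorem mem_pyUnionAll_aux (L : List (List Int)) (acc : PySem.Set Int) (y : Int) :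
    y ∈ L.foldl (fun acc s => PySem.Set.union acc s) acc ↔ y ∈ acc ∨ y ∈ L.flatten := by
  induction L generalizing acc with
  | nil => simp
  | cons s rest ih =>
    simp only [List.foldl_cons, ih, PySem.Set.mem_union, List.flatten_cons, List.mem_append]
    tauto

theorem pyPairsLoop_iff (L : List (List Int)) :
    pyPairsLoop L = true ↔ L.Pairwise (fun s1 s2 => ∀ x ∈ s1, x ∉ s2) := by
  induction L with
  | nil => simp [pyPairsLoop]
  | cons s rest ih =>
    simp only [pyPairsLoop, List.pairwise_cons]
    by_cases h : rest.any (fun s2 => !(PySem.Set.inter s s2).isEmpty)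
    · rw [if_pos h]
      simp only [Bool.false_eq_true, false_iff]
      rintro ⟨h1, -⟩
      obtain ⟨s2, hs2, hne⟩ := List.any_eq_true.1 h
      have hne' : (PySem.Set.inter s s2).isEmpty = false := by simpa using hne
      obtain ⟨y, hy⟩ := List.isEmpty_eq_false_iff_exists_mem.1 hne'
      rw [PySem.Set.mem_inter] at hy
      exact h1 s2 hs2 y hy.1 hy.2
    · rw [if_neg h, ih]
      constructor
      · intro hp
        refine ⟨fun s2 hs2 y hy hy2 => h ?_, hp⟩
        refine List.any_eq_true.2 ⟨s2, hs2, ?_⟩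
        rw [Bool.not_eq_true', List.isEmpty_eq_false_iff_exists_mem]
        exact ⟨y, (PySem.Set.mem_inter _ _ _).2 ⟨hy, hy2⟩⟩
      · exact And.right

theorem a_true_iff (subsets : List (List Int)) (U : List Int) :
    is_partition subsets U = true ↔
      (∀ x ∈ subsets.flatten, x ∈ U) ∧ (∀ x ∈ U, x ∈ subsets.flatten) ∧
        subsets.Pairwise (fun s1 s2 => ∀ x ∈ s1, x ∉ s2) := by
  unfold is_partition
  by_cases h1 : ∀ x ∈ subsets.flatten, x ∈ U
  · have hall : subsets.all (fun subset => PySem.Set.issubset subset U) = true := by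
      simp only [List.all_eq_true]
      intro s hs
      rw [PySem.Set.issubset_iff]
      exact fun x hx => h1 x (List.mem_flatten.2 ⟨s, hs, hx⟩)
    rw [if_neg (by simp [hall])]
    by_cases h2 : ∀ x ∈ U, x ∈ subsets.flatten
    · have heq : PySem.Set.equal (pyUnionAll subsets) U = true := by
        rw [PySem.Set.equal_iff]
        intro x
        unfold pyUnionAll
        rw [mem_pyUnionAll_aux]
        simp only [PySem.Set.empty, List.not_mem_nil, false_or]
        exact ⟨fun hx => h1 x hx, fun hx => h2 x hx⟩
      rw [if_neg (by simp [heq])]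
      rw [pyPairsLoop_iff]
      tauto
    · have hne : PySem.Set.equal (pyUnionAll subsets) U = false := by
        rw [← Bool.not_eq_true, PySem.Set.equal_iff]
        intro hc
        apply h2
        intro x hx
        have := (hc x).2 hx
        unfold pyUnionAll at this
        rw [mem_pyUnionAll_aux] at this
        simpa [PySem.Set.empty] using this
      rw [if_pos (by simp [hne])]
      simp only [Bool.false_eq_true, false_iff]
      tauto
  · have : subsets.all (fun subset => PySem.Set.issubset subset U) = false := by
      rw [← Bool.not_eq_true]
      simp only [List.all_eq_true]
      intro hc
      apply h1
      intro x hx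
      obtain ⟨s, hs, hxs⟩ := List.mem_flatten.1 hx
      exact (PySem.Set.issubset_iff _ _).1 (hc s hs) x hxs
    rw [if_pos (by simp [this])]
    simp only [Bool.false_eq_true, false_iff]
    tauto

-- cardinality bridge: for nodup lists F ⊆ U, |F| = |U| iff U ⊆ F
theorem length_eq_iff_superset (F U : List Int) (hF : F.Nodup) (hU : U.Nodup)
    (hsub : ∀ x ∈ F, x ∈ U) : F.length = U.length ↔ ∀ x ∈ U, x ∈ F := by
  have hsp : F.Subperm U := List.subperm_of_subset hF hsub
  constructor
  · intro hlen x hx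
    exact (hsp.perm_of_length_le (by omega)).mem_iff.2 hx
  · intro hsup
    have hsp2 : U.Subperm F := List.subperm_of_subset hU hsup
    have := hsp.length_le
    have := hsp2.length_le
    omega

-- ===== VERDICT (by name: the statement is the Claim_ definition above) =====
theorem is_partition_spec : Claim_equal_is_partition := by
  intro subsets U _hdom hpre
  unfold Spec_is_partition
  rw [Bool.eq_iff_iff, a_true_iff, alt_true_iff]
  obtain ⟨hU, hsubs⟩ := hpre
  constructor
  · rintro ⟨h1, h2, h3⟩
    have hnd : subsets.flatten.Nodup :=
      List.nodup_flatten.2 ⟨hsubs, h3.imp (fun h => List.disjoint_left.2 h)⟩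
    exact ⟨h1, hnd, (length_eq_iff_superset _ _ hnd hU h1).2 h2⟩
  · rintro ⟨h1, h2, h3⟩
    refine ⟨h1, (length_eq_iff_superset _ _ h2 hU h1).1 h3, ?_⟩
    exact (List.nodup_flatten.1 h2).2.imp (fun h => List.disjoint_left.1 h)
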